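-- pv_equiv track=rewrite | github.com/cwb14/synLTR | module2/ltrharvest3.py | has_nested_run_signature
-- ===== SOURCE A (Python) =====
-- from typing import Dict, List, Tuple, Iterable, Optional
--
-- def has_nested_run_signature(
--     seq: str,
--     chars: List[str],
--     base_min: int = 800,
--     flank_min: int = 80,
-- ) -> bool:
--     """
--     True iff seq contains an adjacent nested pattern:
--       chars[-1]{>=flank} ... chars[1]{>=flank} chars[0]{>=base} chars[1]{>=flank} ... chars[-1]{>=flank}
--
--     Example:
--       [N] => N{>=base}
--       [N,R] => R{>=flank} N{>=base} R{>=flank}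
--       [N,R,D] => D{>=flank} R{>=flank} N{>=base} R{>=flank} D{>=flank}
--
--     Adjacency is enforced: the flank runs must directly touch the inner run.
--     """
--     if not chars:
--         return True
--
--     if base_min <= 0:
--         base_min = 1
--     if flank_min <= 0:
--         flank_min = 1
--
--     s = seq.upper()
--     c0 = chars[0]
--
--     n = len(s)
--     i = 0
--
--     # scan for runs of the base char (chars[0])
--     while i < n:
--         if s[i] != c0:
--             i += 1
--             continue
--
--         j = i
--         while j < n and s[j] == c0:
--             j += 1
--
--         run_len = j - i
--         if run_len >= base_min:
--             # We have a candidate base run [i, j)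
--             left_idx = i       # boundary just before base run
--             right_idx = j      # boundary just after base run
--
--             ok = True
--             # require symmetric adjacent flanks for each nesting level
--             for level in range(1, len(chars)):
--                 c = chars[level]
--
--                 # left flank must end exactly at left_idx-1
--                 l_end = left_idx
--                 l_start = l_end
--                 while l_start > 0 and s[l_start - 1] == c:
--                     l_start -= 1
--                 left_run = l_end - l_start
--                 if left_run < flank_min:
--                     ok = False
--                     break
--
--                 # right flank must start exactly at right_idx
--                 r_start = right_idx
--                 r_end = r_start
--                 while r_end < n and s[r_end] == c:
--                     r_end += 1
--                 right_run = r_end - r_start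
--                 if right_run < flank_min:
--                     ok = False
--                     break
--
--                 # move outward for next level
--                 left_idx = l_start
--                 right_idx = r_end
--
--             if ok:
--                 return True
--
--         # continue scanning after this base run
--         i = j
--
--     return False
-- ===== SOURCE B (Python) =====
-- from typing import List
--
-- def has_nested_run_signature(
--     seq: str,
--     chars: List[str],
--     base_min: int = 800,
--     flank_min: int = 80,
-- ) -> bool:
--     """Compress seq into maximal (char, length) runs once, then check the
--     nested flank pattern by indexing symmetric neighbours in the run list."""
--     if not chars:
--         return True
--     if base_min <= 0:
--         base_min = 1
--     if flank_min <= 0: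
--         flank_min = 1
--
--     # run-length encode the uppercased sequence: one pass, prev-char accumulator
--     runs = []
--     cur = None
--     cnt = 0
--     for ch in seq.upper():
--         if cnt > 0 and ch == cur:
--             cnt += 1
--         else:
--             if cnt > 0:
--                 runs.append((cur, cnt))
--             cur = ch
--             cnt = 1
--     if cnt > 0:
--         runs.append((cur, cnt))
--
--     c0 = chars[0]
--     nruns = len(runs)
--     for k in range(nruns):
--         ch, ln = runs[k]
--         if ch == c0 and ln >= base_min and _flanks_ok(runs, chars, flank_min, k):
--             return True
--     return False
--
--
-- def _flanks_ok(runs, chars, flank_min, k):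
--     nruns = len(runs)
--     li = k - 1
--     ri = k + 1
--     for c in chars[1:]:
--         if li < 0 or ri >= nruns:
--             return False
--         lc, ll = runs[li]
--         rc, rl = runs[ri]
--         if lc != c or ll < flank_min or rc != c or rl < flank_min:
--             return False
--         li -= 1
--         ri += 1
--     return True
-- ===== Notes on version B (the rewrite author's own statement) =====
-- stated objective: alternative
-- what changed: B run-length encodes the uppercased sequence once into a (char, length) run list and checks the base-run/flank pattern by symmetric index lookups in that list, instead of A's index-based while-loop scanning and re-extension of runs in the raw string.
import Mathlib
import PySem

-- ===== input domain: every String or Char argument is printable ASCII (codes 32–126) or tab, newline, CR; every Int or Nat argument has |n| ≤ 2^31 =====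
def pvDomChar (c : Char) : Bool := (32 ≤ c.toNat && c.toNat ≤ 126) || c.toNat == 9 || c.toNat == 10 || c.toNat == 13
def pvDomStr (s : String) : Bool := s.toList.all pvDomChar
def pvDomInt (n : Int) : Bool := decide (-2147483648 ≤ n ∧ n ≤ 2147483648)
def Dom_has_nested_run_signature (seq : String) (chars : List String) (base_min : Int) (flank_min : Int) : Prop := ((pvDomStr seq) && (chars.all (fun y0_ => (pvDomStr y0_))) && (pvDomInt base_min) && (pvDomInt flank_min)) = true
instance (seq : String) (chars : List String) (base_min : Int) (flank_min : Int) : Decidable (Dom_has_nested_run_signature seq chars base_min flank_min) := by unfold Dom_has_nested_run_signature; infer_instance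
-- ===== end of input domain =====

-- B re-implements A by run-length encoding the sequence once and checking the flank
-- pattern by symmetric index lookups in the run list (objective: alternative algorithm).

-- ===== PORT A =====

def pvStrAt (s : List Char) (i : Nat) : String := String.ofList [s.getD i ' ']

def pvExtendR (s : List Char) (c : String) (j : Nat) : Nat :=
  if h : j < s.length ∧ pvStrAt s j = c then pvExtendR s c (j + 1) else j
termination_by s.length - j
decreasing_by omega

theorem pvExtendR_ge (s : List Char) (c : String) (j : Nat) : j ≤ pvExtendR s c j := by
  fun_induction pvExtendR s c j with
  | case1 j h ih => omega
  | case2 j h => omega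


theorem pvExtendR_gt (s : List Char) (c : String) (i : Nat) (h1 : i < s.length)
    (h2 : pvStrAt s i = c) : i < pvExtendR s c i := by
  rw [pvExtendR, dif_pos ⟨h1, h2⟩]
  have := pvExtendR_ge s c (i + 1)
  omega


def pvExtendL (s : List Char) (c : String) (l : Nat) : Nat :=
  if h : 0 < l ∧ pvStrAt s (l - 1) = c then pvExtendL s c (l - 1) else l
termination_by l
decreasing_by omega

def pvFlankA (s : List Char) (fm : Int) : List String → Nat → Nat → Bool
  | [], _, _ => true
  | c :: rest, left_idx, right_idx =>
    let l_start := pvExtendL s c left_idx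
    if ((left_idx - l_start : Nat) : Int) < fm then false
    else
      let r_end := pvExtendR s c right_idx
      if ((r_end - right_idx : Nat) : Int) < fm then false
      else pvFlankA s fm rest l_start r_end


def pvOuterA (s : List Char) (c0 : String) (rest : List String) (bm fm : Int) (i : Nat) : Bool :=
  if h : i < s.length then
    if hne : pvStrAt s i ≠ c0 then pvOuterA s c0 rest bm fm (i + 1)
    else
      let j := pvExtendR s c0 i
      if bm ≤ ((j - i : Nat) : Int) then
        if pvFlankA s fm rest i j then true
        else pvOuterA s c0 rest bm fm j
      else pvOuterA s c0 rest bm fm j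
  else false
termination_by s.length - i
decreasing_by
  · omega
  all_goals
  · have hgt := pvExtendR_gt s c0 i h (by simpa using hne)
    omega


def has_nested_run_signature (seq : String) (chars : List String) (base_min : Int) (flank_min : Int) : Bool :=
  match chars with
  | [] => true
  | c0 :: rest =>
    let bm := if base_min ≤ 0 then 1 else base_min
    let fm := if flank_min ≤ 0 then 1 else flank_min
    let s := (PySem.Str.upper seq).toList
    pvOuterA s c0 rest bm fm 0

-- ===== PORT B =====

def pvRleStep (st : List (Char × Nat) × Char × Nat) (ch : Char) : List (Char × Nat) × Char × Nat :=
  if 0 < st.2.2 ∧ ch = st.2.1 then (st.1, st.2.1, st.2.2 + 1)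
  else ((if 0 < st.2.2 then st.1 ++ [(st.2.1, st.2.2)] else st.1), ch, 1)


def pvRleFinish (st : List (Char × Nat) × Char × Nat) : List (Char × Nat) :=
  if 0 < st.2.2 then st.1 ++ [(st.2.1, st.2.2)] else st.1


def pvRle (s : List Char) : List (Char × Nat) :=
  pvRleFinish (s.foldl pvRleStep ([], ' ', 0))

-- proof-side maximal grouping with an open run (c, l)

def pvFlanksB (runs : List (Char × Nat)) (fm : Int) : List String → Int → Int → Bool
  | [], _, _ => true
  | c :: rest, li, ri =>
    if li < 0 ∨ (runs.length : Int) ≤ ri then false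
    else
      let lp := runs.getD li.toNat (' ', 0)
      let rp := runs.getD ri.toNat (' ', 0)
      if String.ofList [lp.1] ≠ c ∨ (lp.2 : Int) < fm ∨ String.ofList [rp.1] ≠ c ∨ (rp.2 : Int) < fm then false
      else pvFlanksB runs fm rest (li - 1) (ri + 1)


def pvScanB (runs : List (Char × Nat)) (c0 : String) (rest : List String) (bm fm : Int) (k : Nat) : Bool :=
  if k < runs.length then
    let p := runs.getD k (' ', 0)
    if String.ofList [p.1] = c0 ∧ bm ≤ (p.2 : Int) ∧ pvFlanksB runs fm rest ((k : Int) - 1) ((k : Int) + 1) = true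
    then true
    else pvScanB runs c0 rest bm fm (k + 1)
  else false
termination_by runs.length - k


def has_nested_run_signature_alt (seq : String) (chars : List String) (base_min : Int) (flank_min : Int) : Bool :=
  match chars with
  | [] => true
  | c0 :: rest =>
    let bm := if base_min ≤ 0 then 1 else base_min
    let fm := if flank_min ≤ 0 then 1 else flank_min
    let runs := pvRle ((PySem.Str.upper seq).toList)
    pvScanB runs c0 rest bm fm 0

-- ===== PRECONDITION & SPEC =====
def Spec_has_nested_run_signature (seq : String) (chars : List String) (base_min : Int) (flank_min : Int) (out : Bool) : Prop := out = has_nested_run_signature_alt seq chars base_min flank_min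
instance (seq : String) (chars : List String) (base_min : Int) (flank_min : Int) (out : Bool) : Decidable (Spec_has_nested_run_signature seq chars base_min flank_min out) := by unfold Spec_has_nested_run_signature; infer_instance

-- ===== CLAIM (what is proved, stated in full; the proofs are below) =====
def Claim_equal_has_nested_run_signature : Prop := ∀ (seq : String) (chars : List String) (base_min : Int) (flank_min : Int), Dom_has_nested_run_signature seq chars base_min flank_min → Spec_has_nested_run_signature seq chars base_min flank_min (has_nested_run_signature seq chars base_min flank_min)

-- ===== LEMMAS AND PROOFS =====

def pvFlat (R : List (Char × Nat)) : List Char := R.flatMap (fun p => List.replicate p.2 p.1)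

def pvPos (R : List (Char × Nat)) (k : Nat) : Nat := ((R.take k).map (·.2)).sum

def pvGood (R : List (Char × Nat)) : Prop :=
  R.IsChain (fun a b => a.1 ≠ b.1) ∧ ∀ p ∈ R, 1 ≤ p.2


theorem pvOfList_inj (a b : Char) : (String.ofList [a] = String.ofList [b]) ↔ a = b := by
  constructor
  · intro h; have := congrArg String.toList h; simpa using this
  · intro h; rw [h]

theorem pvPos_succ (R : List (Char × Nat)) (k : Nat) (h : k < R.length) :
    pvPos R (k + 1) = pvPos R k + R[k].2 := by
  rw [pvPos, pvPos, List.map_take, List.map_take, List.sum_take_succ _ k (by simpa using h)]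
  simp

theorem pvPos_mono (R : List (Char × Nat)) (k m : Nat) (h : k ≤ m) (hm : m ≤ R.length) :
    pvPos R k ≤ pvPos R m := by
  induction m with
  | zero => have : k = 0 := by omega
            simp [this]
  | succ m ih =>
    rcases Nat.lt_or_ge k (m+1) with hlt | hge
    · have h1 := ih (by omega) (by omega)
      rw [pvPos_succ R m (by omega)]
      omega
    · have : k = m + 1 := by omega
      simp [this]

theorem pvPos_zero (R : List (Char × Nat)) : pvPos R 0 = 0 := by simp [pvPos]


theorem pvFlat_append (a b : List (Char × Nat)) : pvFlat (a ++ b) = pvFlat a ++ pvFlat b := by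
  simp [pvFlat]

theorem pvFlat_cons (p : Char × Nat) (l : List (Char × Nat)) :
    pvFlat (p :: l) = List.replicate p.2 p.1 ++ pvFlat l := by
  simp [pvFlat]

theorem pvFlat_take_length (R : List (Char × Nat)) (k : Nat) :
    (pvFlat (R.take k)).length = pvPos R k := by
  simp [pvFlat, pvPos]

theorem pvFlat_length (R : List (Char × Nat)) : (pvFlat R).length = pvPos R R.length := by
  simp [pvFlat, pvPos]

theorem pvFlat_getElem? (R : List (Char × Nat)) (k t : Nat) (hk : k < R.length) (ht : t < R[k].2) :
    (pvFlat R)[pvPos R k + t]? = some R[k].1 := by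
  have hsplit : pvFlat R = pvFlat (R.take k) ++ pvFlat (R.drop k) := by
    rw [← pvFlat_append, List.take_append_drop]
  rw [hsplit, List.getElem?_append_right (by rw [pvFlat_take_length]; omega), pvFlat_take_length,
      List.drop_eq_getElem_cons hk, pvFlat_cons,
      List.getElem?_append_left (by simpa using (by omega : pvPos R k + t - pvPos R k < R[k].2))]
  simp [ht]

theorem pvStrAt_run (R : List (Char × Nat)) (s : List Char) (hs : s = pvFlat R) (k t : Nat)
    (hk : k < R.length) (ht : t < R[k].2) : pvStrAt s (pvPos R k + t) = String.ofList [R[k].1] := by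
  subst hs
  rw [pvStrAt, List.getD_eq_getElem?_getD, pvFlat_getElem? R k t hk ht]
  rfl

theorem pvChain_ne (R : List (Char × Nat)) (hg : pvGood R) (i : Nat) (h : i + 1 < R.length) :
    R[i].1 ≠ R[i+1].1 := by
  have := hg.1
  rw [List.isChain_iff_getElem] at this
  exact this i (by omega)

theorem pvLen_pos (R : List (Char × Nat)) (hg : pvGood R) (i : Nat) (h : i < R.length) :
    1 ≤ R[i].2 := hg.2 _ (List.getElem_mem h)

theorem pvPos_lt_length (R : List (Char × Nat)) (s : List Char) (hs : s = pvFlat R)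
    (_hg : pvGood R) (k t : Nat) (hk : k < R.length) (ht : t < R[k].2) :
    pvPos R k + t < s.length := by
  subst hs
  rw [pvFlat_length]
  have h1 := pvPos_succ R k hk
  have h2 := pvPos_mono R (k+1) R.length (by omega) (le_refl _)
  omega

-- right extension consumes exactly the rest of run k

theorem pvGetD_eq (R : List (Char × Nat)) (j : Nat) (h : j < R.length) :
    R.getD j (' ', 0) = R[j] := by
  rw [List.getD_eq_getElem?_getD, List.getElem?_eq_getElem h, Option.getD_some]



theorem pvExtendR_run (R : List (Char × Nat)) (s : List Char) (hs : s = pvFlat R)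
    (hg : pvGood R) (k : Nat) (hk : k < R.length) (c : String)
    (hc : String.ofList [R[k].1] = c) :
    ∀ t, t ≤ R[k].2 → pvExtendR s c (pvPos R k + t) = pvPos R (k + 1) := by
  have key : ∀ d t, R[k].2 - t = d → t ≤ R[k].2 → pvExtendR s c (pvPos R k + t) = pvPos R (k + 1) := by
    intro d
    induction d with
    | zero =>
      intro t hd ht
      have ht' : t = R[k].2 := by omega
      subst ht'
      rw [← pvPos_succ R k hk]
      rw [pvExtendR, dif_neg]
      rintro ⟨hlt, heq⟩
      rcases Nat.lt_or_ge (k+1) R.length with hk1 | hk1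
      · have h0 : (0:Nat) < R[k+1].2 := pvLen_pos R hg _ hk1
        have := pvStrAt_run R s hs (k+1) 0 hk1 h0
        rw [Nat.add_zero] at this
        rw [this] at heq
        rw [← hc] at heq
        exact pvChain_ne R hg k (by omega) ((pvOfList_inj _ _).mp heq).symm
      · have : pvPos R (k+1) = s.length := by
          have h2 := pvPos_mono R R.length (k+1) (by omega) (by omega)
          have h3 := pvPos_mono R (k+1) R.length (by omega) (le_refl _)
          rw [hs, pvFlat_length]; omega
        omega
    | succ d ih =>
      intro t hd ht
      have htlt : t < R[k].2 := by omega
      rw [pvExtendR, dif_pos ⟨pvPos_lt_length R s hs hg k t hk htlt,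
        by rw [pvStrAt_run R s hs k t hk htlt]; exact hc⟩]
      have : pvPos R k + t + 1 = pvPos R k + (t + 1) := by omega
      rw [this]
      exact ih (t+1) (by omega) (by omega)
  intro t ht
  exact key (R[k].2 - t) t rfl ht


theorem pvExtendR_end (R : List (Char × Nat)) (s : List Char) (hs : s = pvFlat R) (c : String) :
    pvExtendR s c (pvPos R R.length) = pvPos R R.length := by
  rw [pvExtendR, dif_neg]
  rintro ⟨hlt, -⟩
  rw [hs, pvFlat_length] at hlt
  omega


theorem pvExtendR_stop (R : List (Char × Nat)) (s : List Char) (hs : s = pvFlat R)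
    (hg : pvGood R) (k : Nat) (hk : k < R.length) (c : String)
    (hne : String.ofList [R[k].1] ≠ c) :
    pvExtendR s c (pvPos R k) = pvPos R k := by
  rw [pvExtendR, dif_neg]
  rintro ⟨hlt, heq⟩
  have h0 : (0:Nat) < R[k].2 := pvLen_pos R hg _ hk
  have := pvStrAt_run R s hs k 0 hk h0
  rw [Nat.add_zero] at this
  rw [this] at heq
  exact hne heq

-- left extension from inside run k goes back exactly to the start of run k

theorem pvExtendL_run (R : List (Char × Nat)) (s : List Char) (hs : s = pvFlat R)
    (hg : pvGood R) (k : Nat) (hk : k < R.length) (c : String)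
    (hc : String.ofList [R[k].1] = c) :
    ∀ t, t ≤ R[k].2 → pvExtendL s c (pvPos R k + t) = pvPos R k := by
  intro t
  induction t with
  | zero =>
    intro _
    rw [Nat.add_zero, pvExtendL, dif_neg]
    rintro ⟨hpos, heq⟩
    rcases Nat.eq_zero_or_pos k with hk0 | hk0
    · subst hk0; simp [pvPos] at hpos
    · have hk1 : k - 1 < R.length := by omega
      have hlen1 : 1 ≤ R[k-1].2 := pvLen_pos R hg _ hk1
      have hps : pvPos R k = pvPos R (k-1) + R[k-1].2 := by
        have := pvPos_succ R (k-1) hk1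
        have hkk : k - 1 + 1 = k := by omega
        rw [hkk] at this
        exact this
      have hidx : pvPos R k - 1 = pvPos R (k-1) + (R[k-1].2 - 1) := by omega
      rw [hidx, pvStrAt_run R s hs (k-1) _ hk1 (by omega)] at heq
      rw [← hc] at heq
      have hne := pvChain_ne R hg (k-1) (by omega)
      have hEq2 : R[k-1+1] = R[k] := by
        congr 1
        omega
      rw [hEq2] at hne
      exact hne ((pvOfList_inj _ _).mp heq)
  | succ t ih =>
    intro ht
    rw [pvExtendL, dif_pos ⟨by omega,
      by rw [(by omega : pvPos R k + (t+1) - 1 = pvPos R k + t), pvStrAt_run R s hs k t hk (by omega)]; exact hc⟩]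
    rw [(by omega : pvPos R k + (t+1) - 1 = pvPos R k + t)]
    exact ih (by omega)


theorem pvExtendL_zero (s : List Char) (c : String) : pvExtendL s c 0 = 0 := by
  rw [pvExtendL, dif_neg]; rintro ⟨h, -⟩; omega


theorem pvExtendL_match (R : List (Char × Nat)) (s : List Char) (hs : s = pvFlat R)
    (hg : pvGood R) (j : Nat) (hj : j < R.length) (c : String)
    (hc : String.ofList [R[j].1] = c) :
    pvExtendL s c (pvPos R (j + 1)) = pvPos R j := by
  rw [pvPos_succ R j hj]
  exact pvExtendL_run R s hs hg j hj c hc _ (le_refl _)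


theorem pvExtendL_stop (R : List (Char × Nat)) (s : List Char) (hs : s = pvFlat R)
    (hg : pvGood R) (j : Nat) (hj : j < R.length) (c : String)
    (hne : String.ofList [R[j].1] ≠ c) :
    pvExtendL s c (pvPos R (j + 1)) = pvPos R (j + 1) := by
  rw [pvExtendL, dif_neg]
  rintro ⟨hpos, heq⟩
  have hlen1 : 1 ≤ R[j].2 := pvLen_pos R hg _ hj
  have hps := pvPos_succ R j hj
  have hidx : pvPos R (j+1) - 1 = pvPos R j + (R[j].2 - 1) := by omega
  rw [hidx, pvStrAt_run R s hs j _ hj (by omega)] at heq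
  exact hne heq


theorem pvFlankA_cons (s : List Char) (fm : Int) (c : String) (cs' : List String) (li ri : Nat) :
    pvFlankA s fm (c :: cs') li ri =
      if ((li - pvExtendL s c li : Nat) : Int) < fm then false
      else if ((pvExtendR s c ri - ri : Nat) : Int) < fm then false
      else pvFlankA s fm cs' (pvExtendL s c li) (pvExtendR s c ri) := by
  simp only [pvFlankA]


theorem pvFlanksB_cons (R : List (Char × Nat)) (fm : Int) (c : String) (cs' : List String) (li ri : Int) :
    pvFlanksB R fm (c :: cs') li ri =
      if li < 0 ∨ (R.length : Int) ≤ ri then false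
      else if String.ofList [(R.getD li.toNat (' ', 0)).1] ≠ c ∨ ((R.getD li.toNat (' ', 0)).2 : Int) < fm ∨
              String.ofList [(R.getD ri.toNat (' ', 0)).1] ≠ c ∨ ((R.getD ri.toNat (' ', 0)).2 : Int) < fm then false
      else pvFlanksB R fm cs' (li - 1) (ri + 1) := by
  simp only [pvFlanksB]


theorem pvFlanksB_step (R : List (Char × Nat)) (fm : Int) (c : String) (cs' : List String)
    (j b : Nat) (hj : j < R.length) (hb : b < R.length) :
    pvFlanksB R fm (c :: cs') (((j + 1 : Nat) : Int) - 1) ((b : Nat) : Int) =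
      if String.ofList [R[j].1] ≠ c ∨ (R[j].2 : Int) < fm ∨
         String.ofList [R[b].1] ≠ c ∨ (R[b].2 : Int) < fm then false
      else pvFlanksB R fm cs' ((j : Int) - 1) ((b + 1 : Nat) : Int) := by
  rw [pvFlanksB_cons]
  rw [if_neg (by push_cast; omega)]
  have h1 : (((j + 1 : Nat) : Int) - 1).toNat = j := by omega
  have h2 : ((b : Nat) : Int).toNat = b := by omega
  rw [h1, h2, pvGetD_eq R j hj, pvGetD_eq R b hb]
  have h3 : ((j + 1 : Nat) : Int) - 1 - 1 = (j : Int) - 1 := by push_cast; ring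
  have h4 : ((b : Nat) : Int) + 1 = ((b + 1 : Nat) : Int) := by push_cast; ring
  rw [h3, h4]


theorem pvFlanksB_off_right (R : List (Char × Nat)) (fm : Int) (c : String) (cs' : List String) (li : Int) :
    pvFlanksB R fm (c :: cs') li ((R.length : Nat) : Int) = false := by
  rw [pvFlanksB_cons, if_pos (by omega)]


theorem pvFlanksB_neg_left (R : List (Char × Nat)) (fm : Int) (c : String) (cs' : List String) (ri : Int) :
    pvFlanksB R fm (c :: cs') (((0 : Nat) : Int) - 1) ri = false := by
  rw [pvFlanksB_cons, if_pos (by omega)]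


theorem pvFlank_eq (R : List (Char × Nat)) (s : List Char) (hs : s = pvFlat R)
    (hg : pvGood R) (fm : Int) (hf : 1 ≤ fm) :
    ∀ (cs : List String) (a b : Nat), a ≤ R.length → b ≤ R.length →
      pvFlankA s fm cs (pvPos R a) (pvPos R b) = pvFlanksB R fm cs ((a : Int) - 1) (b : Int) := by
  intro cs
  induction cs with
  | nil => intro a b _ _; rfl
  | cons c cs' ih =>
    intro a b ha hb
    match a with
    | 0 =>
      rw [pvFlankA_cons]
      simp only [pvPos_zero, pvExtendL_zero]
      rw [if_pos (by omega), pvFlanksB_neg_left]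
    | j + 1 =>
      have hj : j < R.length := by omega
      rw [pvFlankA_cons]
      by_cases hlm : String.ofList [R[j].1] = c
      · rw [pvExtendL_match R s hs hg j hj c hlm]
        have hrun : pvPos R (j+1) - pvPos R j = R[j].2 := by
          have := pvPos_succ R j hj; omega
        rw [hrun]
        by_cases hll : (R[j].2 : Int) < fm
        · rw [if_pos hll]
          rcases Nat.lt_or_ge b R.length with hbr | hbr
          · rw [pvFlanksB_step R fm c cs' j b hj hbr, if_pos (by tauto)]
          · have hbl : b = R.length := by omega
            subst hbl
            rw [pvFlanksB_off_right]
        · rw [if_neg hll]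
          rcases Nat.lt_or_ge b R.length with hbr | hbr
          · by_cases hrm : String.ofList [R[b].1] = c
            · have hre : pvExtendR s c (pvPos R b) = pvPos R (b+1) := by
                have := pvExtendR_run R s hs hg b hbr c hrm 0 (by omega)
                rwa [Nat.add_zero] at this
              rw [hre]
              have hrr : pvPos R (b+1) - pvPos R b = R[b].2 := by
                have := pvPos_succ R b hbr; omega
              rw [hrr, pvFlanksB_step R fm c cs' j b hj hbr]
              by_cases hrl : (R[b].2 : Int) < fm
              · rw [if_pos hrl, if_pos (by tauto)]
              · rw [if_neg hrl, if_neg (by push Not; exact ⟨hlm, by omega, hrm, by omega⟩)]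
                exact ih j (b+1) (by omega) (by omega)
            · rw [pvExtendR_stop R s hs hg b hbr c hrm]
              rw [(by omega : pvPos R b - pvPos R b = 0)]
              rw [if_pos (by omega), pvFlanksB_step R fm c cs' j b hj hbr, if_pos (by tauto)]
          · have hbl : b = R.length := by omega
            subst hbl
            rw [pvExtendR_end R s hs c]
            rw [(by omega : pvPos R R.length - pvPos R R.length = 0)]
            rw [if_pos (by omega), pvFlanksB_off_right]
      · rw [pvExtendL_stop R s hs hg j hj c hlm]
        rw [(by omega : pvPos R (j+1) - pvPos R (j+1) = 0)]
        rw [if_pos (by omega)]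
        rcases Nat.lt_or_ge b R.length with hbr | hbr
        · rw [pvFlanksB_step R fm c cs' j b hj hbr, if_pos (by tauto)]
        · have hbl : b = R.length := by omega
          subst hbl
          rw [pvFlanksB_off_right]


theorem pvSkip (R : List (Char × Nat)) (s : List Char) (hs : s = pvFlat R) (hg : pvGood R)
    (c0 : String) (rest : List String) (bm fm : Int) (k : Nat) (hk : k < R.length)
    (hne : String.ofList [R[k].1] ≠ c0) :
    ∀ d t, R[k].2 - t = d → t ≤ R[k].2 →
      pvOuterA s c0 rest bm fm (pvPos R k + t) = pvOuterA s c0 rest bm fm (pvPos R (k + 1)) := by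
  intro d
  induction d with
  | zero =>
    intro t hd ht
    have ht' : t = R[k].2 := by omega
    subst ht'
    rw [← pvPos_succ R k hk]
  | succ d ih =>
    intro t hd ht
    have htlt : t < R[k].2 := by omega
    conv_lhs => rw [pvOuterA]
    rw [dif_pos (pvPos_lt_length R s hs hg k t hk htlt)]
    rw [dif_pos (by rw [pvStrAt_run R s hs k t hk htlt]; exact hne)]
    rw [(by omega : pvPos R k + t + 1 = pvPos R k + (t + 1))]
    exact ih (t + 1) (by omega) (by omega)


theorem pvMain (R : List (Char × Nat)) (s : List Char) (hs : s = pvFlat R) (hg : pvGood R)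
    (c0 : String) (rest : List String) (bm fm : Int) (hf : 1 ≤ fm) :
    ∀ d k, R.length - k = d → k ≤ R.length →
      pvOuterA s c0 rest bm fm (pvPos R k) = pvScanB R c0 rest bm fm k := by
  intro d
  induction d with
  | zero =>
    intro k hd hk
    have hk' : k = R.length := by omega
    subst hk'
    rw [pvOuterA, dif_neg (by rw [hs, pvFlat_length]; omega)]
    rw [pvScanB, if_neg (by omega)]
  | succ d ih =>
    intro k hd hk
    have hklt : k < R.length := by omega
    have hlen : 1 ≤ R[k].2 := pvLen_pos R hg k hklt
    have hin : pvPos R k < s.length := by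
      have := pvPos_lt_length R s hs hg k 0 hklt (by omega); omega
    have hat : pvStrAt s (pvPos R k) = String.ofList [R[k].1] := by
      have := pvStrAt_run R s hs k 0 hklt (by omega)
      rwa [Nat.add_zero] at this
    conv_rhs => rw [pvScanB]
    rw [if_pos hklt]
    simp only [pvGetD_eq R k hklt]
    by_cases hm : String.ofList [R[k].1] = c0
    · -- base-char run: A jumps over it exactly like B's candidate test
      have hre : pvExtendR s c0 (pvPos R k) = pvPos R (k + 1) := by
        have := pvExtendR_run R s hs hg k hklt c0 hm 0 (by omega)
        rwa [Nat.add_zero] at this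
      have hrun : pvPos R (k+1) - pvPos R k = R[k].2 := by
        have := pvPos_succ R k hklt; omega
      conv_lhs => rw [pvOuterA]
      rw [dif_pos hin, dif_neg (by rw [hat]; simp [hm])]
      simp only [hre, hrun]
      have hfl : pvFlankA s fm rest (pvPos R k) (pvPos R (k + 1)) =
          pvFlanksB R fm rest ((k : Int) - 1) ((k : Int) + 1) := by
        have := pvFlank_eq R s hs hg fm hf rest k (k + 1) (by omega) (by omega)
        rw [this]
        norm_num
      by_cases hbm : bm ≤ (R[k].2 : Int)
      · rw [if_pos hbm]
        by_cases hok : pvFlanksB R fm rest ((k : Int) - 1) ((k : Int) + 1) = true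
        · rw [hfl, if_pos hok, if_pos ⟨hm, hbm, hok⟩]
        · rw [hfl, if_neg (by simpa using hok), if_neg (by tauto)]
          exact ih (k + 1) (by omega) (by omega)
      · rw [if_neg hbm, if_neg (by tauto)]
        exact ih (k + 1) (by omega) (by omega)
    · -- not the base char: A walks through the run one position at a time
      conv_lhs => rw [pvOuterA]
      rw [dif_pos hin, dif_pos (by rw [hat]; exact hm)]
      rw [(by omega : pvPos R k + 1 = pvPos R k + 1)]
      have hskip := pvSkip R s hs hg c0 rest bm fm k hklt hm (R[k].2 - 1) 1 (by omega) (by omega)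
      rw [(by omega : pvPos R k + 1 = pvPos R k + 1)] at hskip
      rw [hskip]
      rw [if_neg (by tauto)]
      exact ih (k + 1) (by omega) (by omega)


def pvGrp (c : Char) (l : Nat) : List Char → List (Char × Nat)
  | [] => [(c, l)]
  | d :: t => if d = c then pvGrp c (l + 1) t else (c, l) :: pvGrp d 1 t


theorem pvRle_fold (t : List Char) : ∀ (runs : List (Char × Nat)) (c : Char) (l : Nat), 0 < l →
    pvRleFinish (t.foldl pvRleStep (runs, c, l)) = runs ++ pvGrp c l t := by
  induction t with
  | nil =>
    intro runs c l hl
    simp [pvRleFinish, pvGrp, hl]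
  | cons d t ih =>
    intro runs c l hl
    rw [List.foldl_cons]
    by_cases hd : d = c
    · rw [show pvRleStep (runs, c, l) d = (runs, c, l + 1) by simp [pvRleStep, hd, hl]]
      rw [ih runs c (l + 1) (by omega), pvGrp, if_pos hd]
    · rw [show pvRleStep (runs, c, l) d = (runs ++ [(c, l)], d, 1) by simp [pvRleStep, hd, hl]]
      rw [ih (runs ++ [(c, l)]) d 1 (by omega), pvGrp, if_neg hd]
      simp


theorem pvRle_nil : pvRle [] = [] := by simp [pvRle, pvRleFinish]


theorem pvRle_cons (d : Char) (t : List Char) : pvRle (d :: t) = pvGrp d 1 t := by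
  rw [pvRle, List.foldl_cons]
  rw [show pvRleStep ([], ' ', 0) d = ([], d, 1) by simp [pvRleStep]]
  simpa using pvRle_fold t [] d 1 (by omega)


theorem pvGrp_flat (t : List Char) : ∀ (c : Char) (l : Nat), 0 < l →
    pvFlat (pvGrp c l t) = List.replicate l c ++ t := by
  induction t with
  | nil => intro c l _; simp [pvGrp, pvFlat]
  | cons d t ih =>
    intro c l hl
    rw [pvGrp]
    by_cases hd : d = c
    · rw [if_pos hd, ih c (l + 1) (by omega), hd, List.replicate_succ']
      simp
    · rw [if_neg hd, pvFlat_cons, ih d 1 (by omega)]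
      simp


theorem pvGrp_len (t : List Char) : ∀ (c : Char) (l : Nat), 0 < l →
    ∀ p ∈ pvGrp c l t, 1 ≤ p.2 := by
  induction t with
  | nil => intro c l hl p hp; simp [pvGrp] at hp; subst hp; simpa
  | cons d t ih =>
    intro c l hl p hp
    rw [pvGrp] at hp
    by_cases hd : d = c
    · rw [if_pos hd] at hp; exact ih c (l + 1) (by omega) p hp
    · rw [if_neg hd] at hp
      rcases List.mem_cons.mp hp with h | h
      · subst h; simpa
      · exact ih d 1 (by omega) p h


theorem pvGrp_head (t : List Char) : ∀ (c : Char) (l : Nat), ∃ m rest, pvGrp c l t = (c, m) :: rest := by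
  induction t with
  | nil => intro c l; exact ⟨l, [], rfl⟩
  | cons d t ih =>
    intro c l
    rw [pvGrp]
    by_cases hd : d = c
    · rw [if_pos hd]; exact ih c (l + 1)
    · rw [if_neg hd]; exact ⟨l, _, rfl⟩


theorem pvGrp_chain (t : List Char) : ∀ (c : Char) (l : Nat),
    (pvGrp c l t).IsChain (fun a b => a.1 ≠ b.1) := by
  induction t with
  | nil => intro c l; simp [pvGrp]
  | cons d t ih =>
    intro c l
    rw [pvGrp]
    by_cases hd : d = c
    · rw [if_pos hd]; exact ih c (l + 1)
    · rw [if_neg hd]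
      refine List.IsChain.cons (ih d 1) ?_
      intro b hb
      obtain ⟨m, rest, hgr⟩ := pvGrp_head t d 1
      rw [hgr] at hb
      simp at hb
      subst hb
      simpa using fun h => hd h.symm


theorem pvRle_flat (s : List Char) : pvFlat (pvRle s) = s := by
  cases s with
  | nil => rw [pvRle_nil]; rfl
  | cons d t => rw [pvRle_cons, pvGrp_flat t d 1 (by omega)]; simp


theorem pvRle_good (s : List Char) : pvGood (pvRle s) := by
  cases s with
  | nil => rw [pvRle_nil]; exact ⟨by simp, by simp⟩
  | cons d t =>
    rw [pvRle_cons]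
    exact ⟨pvGrp_chain t d 1, pvGrp_len t d 1 (by omega)⟩

theorem pvEquiv (seq : String) (chars : List String) (base_min flank_min : Int) :
    has_nested_run_signature seq chars base_min flank_min =
      has_nested_run_signature_alt seq chars base_min flank_min := by
  cases chars with
  | nil => rfl
  | cons c0 rest =>
    simp only [has_nested_run_signature, has_nested_run_signature_alt]
    have hs : (PySem.Str.upper seq).toList = pvFlat (pvRle ((PySem.Str.upper seq).toList)) :=
      (pvRle_flat _).symm
    have hg := pvRle_good ((PySem.Str.upper seq).toList)
    have hf : (1 : Int) ≤ (if flank_min ≤ 0 then 1 else flank_min) := by split_ifs <;> omega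
    have hmain := pvMain (pvRle ((PySem.Str.upper seq).toList)) ((PySem.Str.upper seq).toList)
      hs hg c0 rest (if base_min ≤ 0 then 1 else base_min) (if flank_min ≤ 0 then 1 else flank_min)
      hf ((pvRle ((PySem.Str.upper seq).toList)).length) 0 (by omega) (by omega)
    rw [pvPos_zero] at hmain
    exact hmain

-- ===== VERDICT (by name: the statement is the Claim_ definition above) =====
theorem has_nested_run_signature_spec : Claim_equal_has_nested_run_signature := by
  intro seq chars base_min flank_min _
  unfold Spec_has_nested_run_signature
  exact pvEquiv seq chars base_min flank_min
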